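-- pv_equiv track=rewrite | github.com/przemyslaw-pawelczak/inUnity | sceptic/ScEpTIC/tools.py | get_index_in_context
-- ===== SOURCE A (Python) =====
-- def get_index_in_context(lst, index, start_tokens = ['(', '[', '{', '<'], end_tokens = [')', ']', '}', '>']):
--     """
--     Return the index of the element "index" inside list lst.
--     Elements between start_token and end_token are not considered as valid indexes.
--     (Usefule to split / find subgroups [a, b] , [c, d])
--     """
--
--     opened_tokens = []
--
--     for i in range(0, len(start_tokens)):
--         opened_tokens.append(0)
--
--     for i in range(0, len(lst)):
--         element = lst[i]
--
--         # increment / decrement opened tokens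
--         if element in start_tokens:
--             token_index = start_tokens.index(element)
--             opened_tokens[token_index] += 1
--         elif element in end_tokens:
--             token_index = end_tokens.index(element)
--             opened_tokens[token_index] -= 1
--
--         if sum(opened_tokens) == 0 and element == index:
--             return i
--
--     return None
-- ===== SOURCE B (Python) =====
-- def get_index_in_context(lst, index, start_tokens = ['(', '[', '{', '<'], end_tokens = [')', ']', '}', '>']):
--     # Pass 1: per-element depth delta (+1 start token, -1 end token, 0 otherwise; start wins).
--     deltas = [1 if e in start_tokens else (-1 if e in end_tokens else 0) for e in lst]
--     # Pass 2: running prefix sums = depth AFTER processing each element.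
--     depths = []
--     total = 0
--     for d in deltas:
--         total += d
--         depths.append(total)
--     # Pass 3: first index at depth 0 whose element equals `index`.
--     for i, (e, depth) in enumerate(zip(lst, depths)):
--         if depth == 0 and e == index:
--             return i
--     return None
-- ===== Notes on version B (the rewrite author's own statement) =====
-- stated objective: faster
-- what changed: Replaces A's per-token counter list (mutated and re-summed with sum() on every iteration) with three passes over a single running total: a delta list, a prefix-sum depth table, then one scan over zip(lst, depths); dropping the per-element sum() is the constant-factor gain.
-- outside the precondition, e.g. on get_index_in_context(['a', ']'], 'a', ['('], ['[', ']']): A returns 0, B returns 0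
import Mathlib
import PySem

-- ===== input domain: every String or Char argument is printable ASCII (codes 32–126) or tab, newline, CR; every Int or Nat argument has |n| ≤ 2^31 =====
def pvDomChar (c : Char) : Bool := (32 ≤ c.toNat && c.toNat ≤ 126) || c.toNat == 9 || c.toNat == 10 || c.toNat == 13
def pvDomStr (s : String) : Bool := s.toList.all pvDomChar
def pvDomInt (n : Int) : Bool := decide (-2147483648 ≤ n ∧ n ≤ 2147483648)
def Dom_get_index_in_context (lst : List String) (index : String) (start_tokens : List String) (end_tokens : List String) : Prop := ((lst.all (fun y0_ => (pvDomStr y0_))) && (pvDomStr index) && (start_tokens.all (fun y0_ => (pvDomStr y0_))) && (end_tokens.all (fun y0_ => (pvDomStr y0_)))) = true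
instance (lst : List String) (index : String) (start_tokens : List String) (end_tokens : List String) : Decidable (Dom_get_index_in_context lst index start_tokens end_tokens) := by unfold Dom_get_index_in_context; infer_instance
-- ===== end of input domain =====

-- B replaces A's mutable per-token counter list with a delta list, a prefix-sum depth table
-- and a single scan (objective: simpler decomposition; same asymptotic cost).

-- ===== PORT A =====
-- the if/elif counter update inside A's loop body
def giicA_step (start_tokens : List String) (end_tokens : List String)
    (element : String) (opened : List Int) : List Int :=
  if element ∈ start_tokens then
    match PySem.List.index? start_tokens element with
    | some t => opened.set t (opened.getD t 0 + 1)
    | none => opened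
  else if element ∈ end_tokens then
    match PySem.List.index? end_tokens element with
    | some t =>
      -- Python raises IndexError when t ≥ len(opened_tokens); such inputs are outside Pre_
      if t < opened.length then opened.set t (opened.getD t 0 - 1) else opened
    | none => opened
  else opened

-- the main for-loop of A: state = (remaining list, current index i, opened_tokens counters)
def giicA_loop (index : String) (start_tokens : List String) (end_tokens : List String) :
    List String → Nat → List Int → Option Int
  | [], _, _ => none
  | element :: rest, i, opened =>
    let opened' := giicA_step start_tokens end_tokens element opened
    if opened'.sum = 0 ∧ element = index then some (i : Int)
    else giicA_loop index start_tokens end_tokens rest (i + 1) opened'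

def get_index_in_context (lst : List String) (index : String) (start_tokens : List String) (end_tokens : List String) : Option Int :=
  -- first loop: opened_tokens.append(0) for each start token
  let opened_tokens := (List.range start_tokens.length).foldl (fun acc _ => acc ++ [(0 : Int)]) []
  giicA_loop index start_tokens end_tokens lst 0 opened_tokens

-- ===== PORT B =====
-- pass 3 of B: first index at depth 0 whose element equals `index`
def giicB_find (index : String) : List (String × Int) → Nat → Option Int
  | [], _ => none
  | (e, d) :: rest, i => if d = 0 ∧ e = index then some (i : Int) else giicB_find index rest (i + 1)

def get_index_in_context_alt (lst : List String) (index : String) (start_tokens : List String) (end_tokens : List String) : Option Int :=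
  -- pass 1: per-element depth delta
  let deltas := lst.map (fun e => if e ∈ start_tokens then (1 : Int) else if e ∈ end_tokens then -1 else 0)
  -- pass 2: running prefix sums (loop with `total` accumulator appending to `depths`)
  let depths := (deltas.foldl (fun (p : List Int × Int) d => (p.1 ++ [p.2 + d], p.2 + d)) ([], 0)).1
  giicB_find index (lst.zip depths) 0

-- ===== PRECONDITION & SPEC =====
-- Pre_ excludes inputs containing an element that is only an end token whose position in
-- end_tokens is ≥ len(start_tokens): there A's `opened_tokens[token_index] -= 1` raises
-- IndexError when the loop reaches it (slightly narrower than the exact raising set: A may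
-- return earlier in the loop before reaching such an element — see claim.json cites).
def Pre_get_index_in_context (lst : List String) (index : String) (start_tokens : List String) (end_tokens : List String) : Prop :=
  ∀ e ∈ lst, e ∉ start_tokens → e ∈ end_tokens →
    (PySem.List.index? end_tokens e).getD 0 < start_tokens.length

instance (lst : List String) (index : String) (start_tokens : List String) (end_tokens : List String) : Decidable (Pre_get_index_in_context lst index start_tokens end_tokens) := by unfold Pre_get_index_in_context; infer_instance

def pvWitness_get_index_in_context : List String × String × List String × List String :=
  (["a", "(", "a", ")", "a"], "a", ["(", "[", "{", "<"], [")", "]", "}", ">"])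

def Spec_get_index_in_context (lst : List String) (index : String) (start_tokens : List String) (end_tokens : List String) (out : Option Int) : Prop := out = get_index_in_context_alt lst index start_tokens end_tokens
instance (lst : List String) (index : String) (start_tokens : List String) (end_tokens : List String) (out : Option Int) : Decidable (Spec_get_index_in_context lst index start_tokens end_tokens out) := by unfold Spec_get_index_in_context; infer_instance

-- ===== CLAIM (what is proved, stated in full; the proofs are below) =====
def Claim_equal_get_index_in_context : Prop := ∀ (lst : List String) (index : String) (start_tokens : List String) (end_tokens : List String), Dom_get_index_in_context lst index start_tokens end_tokens → Pre_get_index_in_context lst index start_tokens end_tokens → Spec_get_index_in_context lst index start_tokens end_tokens (get_index_in_context lst index start_tokens end_tokens)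

-- ===== LEMMAS AND PROOFS =====

-- depth list as a scan (proof-side characterisation of B's pass 2)
def giicScan (t : Int) : List Int → List Int
  | [] => []
  | d :: ds => (t + d) :: giicScan (t + d) ds

theorem giic_foldl_scan (ds : List Int) (acc : List Int) (t : Int) :
    (ds.foldl (fun (p : List Int × Int) d => (p.1 ++ [p.2 + d], p.2 + d)) (acc, t)).1
      = acc ++ giicScan t ds := by
  induction ds generalizing acc t with
  | nil => simp [giicScan]
  | cons d ds ih => simp [giicScan, ih]

theorem giic_sum_set_add (l : List Int) (n : Nat) (c : Int) (h : n < l.length) :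
    (l.set n (l.getD n 0 + c)).sum = l.sum + c := by
  induction l generalizing n with
  | nil => simp at h
  | cons a l ih =>
    cases n with
    | zero => simp [List.getD]; ring
    | succ m =>
      simp only [List.set, List.sum_cons, List.getD_cons_succ]
      rw [ih m (by simpa using h)]
      ring

theorem giic_init_replicate (l : List Nat) (acc : List Int) :
    l.foldl (fun acc _ => acc ++ [(0 : Int)]) acc = acc ++ List.replicate l.length 0 := by
  induction l generalizing acc with
  | nil => simp
  | cons x l ih => simp [ih, List.replicate_succ]

theorem giic_step_length (st et : List String) (e : String) (opened : List Int) :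
    (giicA_step st et e opened).length = opened.length := by
  unfold giicA_step
  by_cases hs : e ∈ st
  · simp only [if_pos hs]
    cases PySem.List.index? st e <;> simp
  · simp only [if_neg hs]
    by_cases he : e ∈ et
    · simp only [if_pos he]
      cases PySem.List.index? et e with
      | none => rfl
      | some t =>
        dsimp only
        split_ifs <;> simp
    · simp [he]

theorem giic_step_sum (st et : List String) (e : String) (opened : List Int)
    (hlen : opened.length = st.length)
    (hpre_e : e ∉ st → e ∈ et → (PySem.List.index? et e).getD 0 < st.length) :
    (giicA_step st et e opened).sum
      = opened.sum + (if e ∈ st then (1 : Int) else if e ∈ et then -1 else 0) := by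
  unfold giicA_step
  by_cases hs : e ∈ st
  · obtain ⟨k, hk⟩ := Option.isSome_iff_exists.mp ((PySem.List.index?_isSome_iff st e).mpr hs)
    obtain ⟨hklt, -, -⟩ := PySem.List.getElem_of_index?_eq_some hk
    simp only [if_pos hs, hk]
    exact giic_sum_set_add opened k 1 (hlen ▸ hklt)
  · by_cases he : e ∈ et
    · obtain ⟨k, hk⟩ := Option.isSome_iff_exists.mp ((PySem.List.index?_isSome_iff et e).mpr he)
      have hklt : k < opened.length := by
        have h2 := hpre_e hs he
        rw [hk] at h2
        simpa [hlen] using h2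
      simp only [if_neg hs, if_pos he, hk, if_pos hklt]
      simpa using giic_sum_set_add opened k (-1) hklt
    · simp [hs, he]

theorem giic_loop_eq (index : String) (st et : List String) (lst : List String) (i : Nat)
    (opened : List Int) (hlen : opened.length = st.length)
    (hpre : ∀ e ∈ lst, e ∉ st → e ∈ et → (PySem.List.index? et e).getD 0 < st.length) :
    giicA_loop index st et lst i opened
      = giicB_find index
          (lst.zip (giicScan opened.sum
            (lst.map (fun e => if e ∈ st then (1 : Int) else if e ∈ et then -1 else 0)))) i := by
  induction lst generalizing i opened with
  | nil => simp [giicA_loop, giicB_find]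
  | cons e rest ih =>
    have hsum := giic_step_sum st et e opened hlen
      (fun h1 h2 => hpre e (List.mem_cons_self) h1 h2)
    simp only [giicA_loop, List.map_cons, giicScan, List.zip_cons_cons, giicB_find]
    rw [hsum]
    by_cases h : (opened.sum + (if e ∈ st then (1 : Int) else if e ∈ et then -1 else 0)) = 0
        ∧ e = index
    · rw [if_pos h, if_pos h]
    · rw [if_neg h, if_neg h,
        ih (i + 1) _ (by rw [giic_step_length]; exact hlen)
          (fun x hx => hpre x (List.mem_cons_of_mem e hx)), hsum]

-- ===== VERDICT (by name: the statement is the Claim_ definition above) =====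
theorem get_index_in_context_spec : Claim_equal_get_index_in_context := by
  intro lst index st et _hdom hpre
  unfold Spec_get_index_in_context get_index_in_context get_index_in_context_alt
  dsimp only
  rw [giic_foldl_scan, giic_init_replicate, List.nil_append, List.nil_append,
    List.length_range]
  rw [giic_loop_eq index st et lst 0 _ (by simp) hpre]
  congr 2
  simp
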